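/- GENERATED by farm/mkstatement.py from design/units.tsv (unit `start_decoder.9c`) and the assertions of Vorbis/Spec/StartDecoder9.lean — do not edit.
   THE STATEMENT of the proof unit `start_decoder.9c`: segment 9c of `start_decoder` (12 instructions; entries 0x1141f7;
   exits 0x1141f7,0x11420a; ranges 0x1141f7-0x114205 + 0x1141d1-0x1141f3)
   takes each of its entry assertions to one of its exit assertions (`Vorbis.Spec.StartDecoder.Seg9c`), given the contracts of its callees.
   What the names mean: Vorbis/Spec/Basic.lean (the shared hypotheses), Vorbis/Spec/StartDecoder9.lean (the assertions). The theorem to prove: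
   `theorem start_decoder_9c_ok : Vorbis.Spec.start_decoder_9c.Statement`. -/
import Vorbis.Spec.Alloc
import Vorbis.Spec.Reader
import Vorbis.Spec.StartDecoder9
namespace Vorbis.Spec.start_decoder_9c
open X86 X86.User Asan

/-- The statement of unit `start_decoder.9c`. -/
def Statement : Prop :=
  ∀ (Lay : Layout) (_hLay : Lay.hi = 0x1000000) (μ : Microarch) (_hμ : UserX.MicroOK μ) (u₀ : State)
    (_hcode : HasCodeNat Lay u₀ Vorbis.L.start_decoder.entry Vorbis.Code.code_start_decoder.nat Vorbis.L.start_decoder.size)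
    (_h_get8_packet : ∀ (others : List Obj) (frames : List (Nat × FrameLayout)) (Blk : Block → Prop) (len : Nat), Calls Lay μ Vorbis.WayInv (Vorbis.conv u₀) Vorbis.L.get8_packet.entry (Vorbis.Spec.get8_packet.spec others frames Blk len))
    (_h_asan_store1_noabort : Asan.SmallCheck Lay μ Vorbis.WayInv (Vorbis.CodeOK u₀) [.rax, .rdx] 1 Vorbis.L.__asan_store1_noabort.entry)
    (_h_vorbis_validate : ∀ (others : List Obj) (frames : List (Nat × FrameLayout)), Calls Lay μ Vorbis.WayInv (Vorbis.conv u₀) Vorbis.L.vorbis_validate.entry (Vorbis.Spec.vorbis_validate.spec others frames)),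
    Vorbis.Spec.StartDecoder.Seg9c Lay μ u₀

end Vorbis.Spec.start_decoder_9c
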